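-- pv_equiv track=rewrite | github.com/KeiferC/EndianFlipper | endian-flip.py | flip_words
-- ===== SOURCE A (Python) =====
-- def flip_words(words_arr):
--         flipped_arr = []
--
--         for word in words_arr:
--                 flipped_word = ""
--
--                 for nibble in range(len(word) - 1, 0, -2):
--                         flipped_word += (word[nibble - 1] + word[nibble])
--
--                 flipped_arr.append(flipped_word)
--
--         return flipped_arr
-- ===== SOURCE B (Python) =====
-- def flip_words(words_arr):
--     out = []
--     for word in words_arr:
--         s = word[len(word) % 2:]          # drop the leading char of an odd-length word
--         r = s[::-1]                       # reverse the trimmed word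
--         # swap each adjacent pair of the reversed string back into source order
--         out.append("".join(r[i + 1] + r[i] for i in range(0, len(r), 2)))
--     return out
-- ===== Notes on version B (the rewrite author's own statement) =====
-- stated objective: alternative
-- what changed: A emits pairs directly in a single right-to-left index loop with string concatenation; B is a two-pass decomposition: trim the leading char of an odd-length word, reverse the whole trimmed string, then swap each adjacent pair back and join.
import Mathlib
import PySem

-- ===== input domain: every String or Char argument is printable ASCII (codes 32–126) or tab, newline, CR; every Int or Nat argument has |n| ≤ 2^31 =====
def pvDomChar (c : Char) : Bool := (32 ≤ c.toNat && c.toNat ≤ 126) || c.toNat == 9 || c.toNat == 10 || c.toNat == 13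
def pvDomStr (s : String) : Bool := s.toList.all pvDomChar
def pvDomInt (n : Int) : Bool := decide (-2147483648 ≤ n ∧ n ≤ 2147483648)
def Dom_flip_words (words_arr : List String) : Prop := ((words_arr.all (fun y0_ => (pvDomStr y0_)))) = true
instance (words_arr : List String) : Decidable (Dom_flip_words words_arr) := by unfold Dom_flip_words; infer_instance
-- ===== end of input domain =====

-- B replaces A's single right-to-left pair-emitting index loop by a two-pass decomposition
-- (trim the odd leading char, reverse the whole string, then swap adjacent pairs); same cost,
-- objective: alternative decomposition.

-- ===== PORT A =====
-- word[i] is ported as (toList.pyGet? i).getD ' '; the loop only visits in-range indices,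
-- so the default is never consulted and the port raises nowhere (A is total).
def flip_words (words_arr : List String) : List String :=
  words_arr.map (fun word =>
    let cs := word.toList
    let flipped := (PySem.List.pyRange ((cs.length : Int) - 1) 0 (-2)).foldl
      (fun acc nibble =>
        acc ++ [(PySem.List.pyGet? cs (nibble - 1)).getD ' ',
                (PySem.List.pyGet? cs nibble).getD ' ']) []
    String.mk flipped)

-- ===== PORT B =====
-- 'r[i+1] + r[i] for i in range(0, len(r), 2)' ported as the structural pair recursion swapPairs
def swapPairs : List Char → List Char
  | x :: y :: t => y :: x :: swapPairs t
  | _ => []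

def flip_words_alt (words_arr : List String) : List String :=
  words_arr.map (fun word =>
    let cs := word.toList
    let s := cs.drop (cs.length % 2)   -- word[len(word) % 2:]
    let r := s.reverse                 -- s[::-1]
    String.mk (swapPairs r))

-- ===== PRECONDITION & SPEC =====
def Spec_flip_words (words_arr : List String) (out : List String) : Prop := out = flip_words_alt words_arr
instance (words_arr : List String) (out : List String) : Decidable (Spec_flip_words words_arr out) := by unfold Spec_flip_words; infer_instance

-- ===== CLAIM (what is proved, stated in full; the proofs are below) =====
def Claim_equal_flip_words : Prop := ∀ (words_arr : List String), Dom_flip_words words_arr → Spec_flip_words words_arr (flip_words words_arr)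

-- ===== LEMMAS AND PROOFS =====

theorem pyRange_neg_two_nil (k : Int) (h : k ≤ 0) :
    PySem.List.pyRange k 0 (-2) = [] := by
  unfold PySem.List.pyRange; simp; omega

theorem pyRange_neg_two_cons (k : Int) (h : 0 < k) :
    PySem.List.pyRange k 0 (-2) = k :: PySem.List.pyRange (k - 2) 0 (-2) := by
  unfold PySem.List.pyRange
  by_cases h2 : 0 < k - 2
  · simp only [if_neg (by norm_num : ¬((-2:Int) = 0)), if_neg (by norm_num : ¬(0:Int) < -2),
      if_pos (by omega : (0:Int) < k), if_pos (by omega : (0:Int) < k - 2)]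
    have hc : ((k - 0 + -(-2) - 1) / -(-2)).toNat = ((k - 2 - 0 + -(-2) - 1) / -(-2)).toNat + 1 := by
      norm_num; omega
    rw [hc, List.range_succ_eq_map]
    simp [List.map_map, Function.comp]
    ring_nf
    simp
  · simp only [if_neg (by norm_num : ¬((-2:Int) = 0)), if_neg (by norm_num : ¬(0:Int) < -2),
      if_pos (by omega : (0:Int) < k), if_neg (by omega : ¬(0:Int) < k - 2)]
    have hc : ((k - 0 + -(-2) - 1) / -(-2)).toNat = 1 := by norm_num; omega
    rw [hc]
    simp

theorem mem_pyRange_neg_two (k i : Int) (h : i ∈ PySem.List.pyRange k 0 (-2)) :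
    0 < i ∧ i ≤ k := by
  unfold PySem.List.pyRange at h
  simp only [if_neg (by norm_num : ¬((-2:Int) = 0)), if_neg (by norm_num : ¬(0:Int) < -2)] at h
  by_cases hk : (0:Int) < k
  · rw [if_pos hk] at h
    simp only [List.mem_map, List.mem_range] at h
    obtain ⟨j, hj, rfl⟩ := h
    have hd : (k - 0 + - -2 - 1) / - -2 = (k + 1) / 2 := by ring_nf
    rw [hd] at hj
    omega
  · rw [if_neg hk] at h; simp at h

def pairAt (cs : List Char) (nibble : Int) : List Char :=
  [(PySem.List.pyGet? cs (nibble - 1)).getD ' ', (PySem.List.pyGet? cs nibble).getD ' ']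

theorem core_aux : ∀ (n : Nat) (cs : List Char), cs.length = n →
    (PySem.List.pyRange ((cs.length : Int) - 1) 0 (-2)).flatMap (pairAt cs) =
    swapPairs ((cs.drop (cs.length % 2)).reverse) := by
  intro n
  induction n using Nat.strong_induction_on with
  | _ n ih =>
    intro cs hn
    match hr : cs.reverse with
    | [] =>
      have hcs : cs = [] := by simpa using congrArg List.reverse hr
      subst hcs
      simp [pyRange_neg_two_nil, swapPairs]
    | [a] =>
      have hcs : cs = [a] := by simpa using congrArg List.reverse hr
      subst hcs
      simp [pyRange_neg_two_nil, swapPairs]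
    | y :: x :: w =>
      have hcs : cs = w.reverse ++ [x, y] := by simpa using congrArg List.reverse hr
      subst hcs
      set u := w.reverse with hu
      have hm : (u ++ [x, y]).length = u.length + 2 := by simp
      rw [hm]
      have hk : ((u.length + 2 : Nat) : Int) - 1 = (u.length : Int) + 1 := by push_cast; ring
      rw [hk, pyRange_neg_two_cons _ (by positivity), List.flatMap_cons]
      -- head pair
      have hx : pairAt (u ++ [x, y]) ((u.length : Int) + 1) = [x, y] := by
        unfold pairAt
        have h1 : ((u.length : Int) + 1) - 1 = ((u.length : Nat) : Int) := by ring
        have h2 : ((u.length : Int) + 1) = (((u.length + 1 : Nat)) : Int) := by push_cast; ring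
        rw [h1, h2, PySem.List.pyGet?_natCast, PySem.List.pyGet?_natCast]
        simp
      rw [hx]
      -- tail: indices lie in u
      have hagree : ∀ i ∈ PySem.List.pyRange ((u.length : Int) + 1 - 2) 0 (-2),
          pairAt (u ++ [x, y]) i = pairAt u i := by
        intro i hi
        obtain ⟨hi1, hi2⟩ := mem_pyRange_neg_two _ _ hi
        unfold pairAt
        have e1 : PySem.List.pyGet? (u ++ [x, y]) (i - 1) = PySem.List.pyGet? u (i - 1) := by
          rw [PySem.List.pyGet?_of_nonneg _ (by omega), PySem.List.pyGet?_of_nonneg _ (by omega)]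
          rw [List.getElem?_append_left (by omega)]
        have e2 : PySem.List.pyGet? (u ++ [x, y]) i = PySem.List.pyGet? u i := by
          rw [PySem.List.pyGet?_of_nonneg _ (by omega), PySem.List.pyGet?_of_nonneg _ (by omega)]
          rw [List.getElem?_append_left (by omega)]
        rw [e1, e2]
      rw [List.flatMap_congr hagree]
      have hlt : u.length < n := by omega
      have ihu := ih u.length hlt u rfl
      have hk2 : ((u.length : Int) + 1 - 2) = (u.length : Int) - 1 := by ring
      rw [hk2, ihu]
      -- RHS
      have hmod : (u.length + 2) % 2 = u.length % 2 := by omega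
      rw [hmod, List.drop_append_of_le_length (by omega : u.length % 2 ≤ u.length)]
      rw [List.reverse_append]
      simp only [List.reverse_cons, List.reverse_nil, List.nil_append, List.cons_append]
      rfl

-- ===== VERDICT (by name: the statement is the Claim_ definition above) =====
theorem flip_words_spec : Claim_equal_flip_words := by
  intro words_arr _
  unfold Spec_flip_words flip_words flip_words_alt
  refine List.map_congr_left (fun word _ => ?_)
  simp only [PySem.List.foldl_append_eq_flatMap, List.nil_append]
  exact congrArg String.mk (core_aux word.toList.length word.toList rfl)
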